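-- pv_equiv track=rewrite | github.com/Najma099/Programming | python/basic/puzzle.py | toggle_doors
-- ===== SOURCE A (Python) =====
-- def toggle_doors(num_doors, num_iterations):
--     doors = [False] * num_doors
--
--     for i in range(1, num_iterations + 1):
--         if i == 1:
--             doors = [True] * num_doors
--         elif i == 2:
--             doors = [not doors[j] if (j + 1) % 2 == 0 else doors[j] for j in range(num_doors)]
--         else:
--             doors = [not doors[j] if (j + 1) % i == 0 else doors[j] for j in range(num_doors)]
--
--     return doors
-- ===== SOURCE B (Python) =====
-- def toggle_doors(num_doors, num_iterations):
--     n = num_doors if num_doors > 0 else 0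
--     m = min(num_iterations, n)
--     counts = [0] * n
--     for i in range(1, m + 1):
--         for j in range(i, n + 1, i):
--             counts[j - 1] += 1
--     return [c % 2 == 1 for c in counts]
-- ===== Notes on version B (the rewrite author's own statement) =====
-- stated objective: faster
-- what changed: Instead of simulating every pass over all doors, B sieves: for each toggle number i up to min(num_iterations, num_doors) it increments a divisor counter only at the multiples of i, then marks a door open iff its divisor count is odd.
import Mathlib
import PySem

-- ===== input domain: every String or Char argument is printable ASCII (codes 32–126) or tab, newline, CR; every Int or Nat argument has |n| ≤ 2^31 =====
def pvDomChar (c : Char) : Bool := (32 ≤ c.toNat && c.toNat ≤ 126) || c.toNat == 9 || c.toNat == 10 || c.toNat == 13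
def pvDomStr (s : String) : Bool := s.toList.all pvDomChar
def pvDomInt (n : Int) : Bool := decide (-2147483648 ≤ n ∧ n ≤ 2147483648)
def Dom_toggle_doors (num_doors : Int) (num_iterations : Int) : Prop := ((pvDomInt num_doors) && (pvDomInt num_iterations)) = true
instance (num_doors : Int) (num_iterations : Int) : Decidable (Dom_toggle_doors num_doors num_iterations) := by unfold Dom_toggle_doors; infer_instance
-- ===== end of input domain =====

-- B replaces A's per-iteration sweep over all doors by a divisor sieve (touching only the
-- multiples of each toggle number, capped at num_doors); objective: faster (asymptotic).

-- ===== PORT A =====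
-- doors[j] is always in range (doors keeps length num_doors.toNat), so pyGetD's default is never used
def toggle_doors (num_doors : Int) (num_iterations : Int) : List Bool :=
  let doors := List.replicate num_doors.toNat false
  (PySem.List.pyRange 1 (num_iterations + 1) 1).foldl (fun doors i =>
    if i = 1 then List.replicate num_doors.toNat true
    else if i = 2 then
      (PySem.List.pyRange 0 num_doors 1).map (fun j =>
        if PySem.Int.mod (j + 1) 2 = 0 then !(PySem.List.pyGetD doors j false)
        else PySem.List.pyGetD doors j false)
    else
      (PySem.List.pyRange 0 num_doors 1).map (fun j =>
        if PySem.Int.mod (j + 1) i = 0 then !(PySem.List.pyGetD doors j false)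
        else PySem.List.pyGetD doors j false))
    doors

-- ===== PORT B =====
-- counts[j-1] += 1 : the index j-1 is in range (i ≤ j ≤ n = counts length), so the set is never a no-op
def toggle_doors_alt (num_doors : Int) (num_iterations : Int) : List Bool :=
  let n : Int := if num_doors > 0 then num_doors else 0
  let m : Int := min num_iterations n
  let counts : List Int := List.replicate n.toNat 0
  let counts := (PySem.List.pyRange 1 (m + 1) 1).foldl (fun counts i =>
    (PySem.List.pyRange i (n + 1) i).foldl (fun counts j =>
      counts.set (j - 1).toNat (PySem.List.pyGetD counts (j - 1) 0 + 1)) counts) counts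
  counts.map (fun c => PySem.Int.mod c 2 == 1)

-- ===== PRECONDITION & SPEC =====
def Spec_toggle_doors (num_doors : Int) (num_iterations : Int) (out : List Bool) : Prop := out = toggle_doors_alt num_doors num_iterations
instance (num_doors : Int) (num_iterations : Int) (out : List Bool) : Decidable (Spec_toggle_doors num_doors num_iterations out) := by unfold Spec_toggle_doors; infer_instance

-- ===== CLAIM (what is proved, stated in full; the proofs are below) =====
def Claim_equal_toggle_doors : Prop := ∀ (num_doors : Int) (num_iterations : Int), Dom_toggle_doors num_doors num_iterations → Spec_toggle_doors num_doors num_iterations (toggle_doors num_doors num_iterations)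

-- ===== LEMMAS AND PROOFS =====

-- number of divisors of d among 1..k
def pvCnt (d k : Nat) : Nat := (List.range k).countP (fun t => d % (t + 1) == 0)

-- common normal form of both programs: door j open iff (j+1) has an odd number of divisors ≤ k
def pvDoors (n k : Nat) : List Bool := (List.range n).map (fun j => decide (pvCnt (j + 1) k % 2 = 1))

lemma pvCnt_zero (d : Nat) : pvCnt d 0 = 0 := by simp [pvCnt]

lemma pvCnt_succ (d k : Nat) :
    pvCnt d (k + 1) = pvCnt d k + (if (k + 1) ∣ d then 1 else 0) := by
  simp [pvCnt, List.range_succ, List.countP_append, Nat.dvd_iff_mod_eq_zero]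

lemma pvCnt_stable (d a b : Nat) (hd : 1 ≤ d) (hda : d ≤ a) (hab : a ≤ b) :
    pvCnt d b = pvCnt d a := by
  induction b with
  | zero => omega
  | succ b ih =>
    rcases Nat.lt_or_ge a (b + 1) with h | h
    · have hb : a ≤ b := by omega
      rw [pvCnt_succ, ih hb]
      have : ¬ (b + 1) ∣ d := by
        intro hdvd
        have := Nat.le_of_dvd (by omega) hdvd
        omega
      simp [this]
    · have : a = b + 1 := by omega
      simp [this]

-- folding the increment over a nodup list of positions 1..len adds 1 exactly at the listed positions
lemma fold_incr (L : List Int) (l : List Int)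
    (hpos : ∀ x ∈ L, 1 ≤ x) (hle : ∀ x ∈ L, x ≤ (l.length : Int)) (hnd : L.Nodup) :
    (L.foldl (fun c j => c.set (j - 1).toNat (PySem.List.pyGetD c (j - 1) 0 + 1)) l).length = l.length ∧
    ∀ k : Nat, k < l.length →
      (L.foldl (fun c j => c.set (j - 1).toNat (PySem.List.pyGetD c (j - 1) 0 + 1)) l).getD k 0
        = l.getD k 0 + (if ((k : Int) + 1) ∈ L then 1 else 0) := by
  induction L generalizing l with
  | nil => simp
  | cons e L ih =>
    have he1 : 1 ≤ e := hpos e (by simp)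
    have hee : (e - 1).toNat < l.length := by
      have := hle e (by simp)
      omega
    set l' := l.set (e - 1).toNat (PySem.List.pyGetD l (e - 1) 0 + 1) with hl'
    have hlen' : l'.length = l.length := by simp [hl']
    have hpos' : ∀ x ∈ L, 1 ≤ x := fun x hx => hpos x (by simp [hx])
    have hle' : ∀ x ∈ L, x ≤ (l'.length : Int) := by
      intro x hx; rw [hlen']; exact hle x (by simp [hx])
    have hnd' : L.Nodup := hnd.of_cons
    have hnotmem : e ∉ L := (List.nodup_cons.mp hnd).1
    obtain ⟨ihlen, ihget⟩ := ih l' hpos' hle' hnd'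
    constructor
    · rw [List.foldl_cons, ← hl', ihlen, hlen']
    · intro k hk
      rw [List.foldl_cons, ← hl', ihget k (by omega)]
      have hget : PySem.List.pyGetD l (e - 1) 0 = l.getD (e - 1).toNat 0 :=
        PySem.List.pyGetD_of_nonneg l 0 (by omega)
      by_cases hke : (k : Int) + 1 = e
      · have hk' : k = (e - 1).toNat := by omega
        have hmem : ¬ ((k : Int) + 1) ∈ L := by rw [hke]; exact hnotmem
        have hstep : l'.getD k 0 = l.getD k 0 + 1 := by
          subst hk'
          rw [hl', List.getD, List.getElem?_set_self hee, hget]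
          rfl
        rw [hstep, if_neg hmem, if_pos (by simp [hke])]
        ring
      · have hk' : k ≠ (e - 1).toNat := by omega
        have hstep : l'.getD k 0 = l.getD k 0 := by
          rw [hl', List.getD, List.getElem?_set_ne (by omega), List.getD]
        rw [hstep]
        simp [List.mem_cons, hke]

lemma nodup_pyRange_pos (a b s : Int) (hs : 0 < s) : (PySem.List.pyRange a b s).Nodup := by
  rw [PySem.List.pyRange_of_pos a b hs]
  refine List.Nodup.map ?_ (List.nodup_range)
  intro x y hxy
  have : (x : Int) = y := by
    have := hxy
    nlinarith [this]
  exact_mod_cast this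

-- one sieve pass with toggle number i adds 1 to counts[k] exactly when i divides k+1
lemma inner_pass (i n : Int) (hi : 1 ≤ i) (l : List Int) (hlen : (l.length : Int) = n) :
    ((PySem.List.pyRange i (n + 1) i).foldl
        (fun c j => c.set (j - 1).toNat (PySem.List.pyGetD c (j - 1) 0 + 1)) l).length = l.length ∧
    ∀ k : Nat, k < l.length →
      ((PySem.List.pyRange i (n + 1) i).foldl
          (fun c j => c.set (j - 1).toNat (PySem.List.pyGetD c (j - 1) 0 + 1)) l).getD k 0
        = l.getD k 0 + (if i ∣ ((k : Int) + 1) then 1 else 0) := by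
  have hs : (0 : Int) < i := by omega
  have hmem : ∀ x : Int, x ∈ PySem.List.pyRange i (n + 1) i ↔ i ≤ x ∧ x < n + 1 ∧ i ∣ x - i := by
    intro x; exact PySem.List.mem_pyRange_iff_of_pos hs x
  obtain ⟨h1, h2⟩ := fold_incr (PySem.List.pyRange i (n + 1) i) l
    (fun x hx => ((hmem x).mp hx).1.trans' hi)
    (fun x hx => by have := (hmem x).mp hx; omega)
    (nodup_pyRange_pos i (n + 1) i hs)
  refine ⟨h1, fun k hk => ?_⟩
  rw [h2 k hk]
  congr 1
  have hdvd : (((k : Int) + 1) ∈ PySem.List.pyRange i (n + 1) i) ↔ i ∣ ((k : Int) + 1) := by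
    rw [hmem]
    constructor
    · rintro ⟨-, -, hd⟩
      have : i ∣ ((k : Int) + 1 - i) + i := Dvd.dvd.add hd dvd_rfl
      simpa using this
    · intro hd
      refine ⟨Int.le_of_dvd (by omega) hd, by omega, ?_⟩
      exact dvd_sub hd dvd_rfl
  simp [hdvd]

-- after the outer sieve loop 1..K, counts[k] = number of divisors of k+1 among 1..K
lemma B_fold (n : Int) (K : Nat) (hn : 0 ≤ n) :
    ((PySem.List.pyRange 1 ((K : Int) + 1) 1).foldl (fun counts i =>
      (PySem.List.pyRange i (n + 1) i).foldl
        (fun c j => c.set (j - 1).toNat (PySem.List.pyGetD c (j - 1) 0 + 1)) counts)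
      (List.replicate n.toNat (0 : Int))).length = n.toNat ∧
    ∀ k : Nat, k < n.toNat →
      ((PySem.List.pyRange 1 ((K : Int) + 1) 1).foldl (fun counts i =>
        (PySem.List.pyRange i (n + 1) i).foldl
          (fun c j => c.set (j - 1).toNat (PySem.List.pyGetD c (j - 1) 0 + 1)) counts)
        (List.replicate n.toNat (0 : Int))).getD k 0 = (pvCnt (k + 1) K : Int) := by
  induction K with
  | zero =>
    rw [PySem.List.pyRange_one_eq_nil (by norm_num)]
    simp [pvCnt_zero]
  | succ K ih =>
    obtain ⟨ihlen, ihget⟩ := ih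
    rw [show ((K + 1 : Nat) : Int) + 1 = ((K : Int) + 1) + 1 by push_cast; ring,
        PySem.List.pyRange_one_succ_right (by omega), List.foldl_append, List.foldl_cons,
        List.foldl_nil]
    generalize hg : (PySem.List.pyRange 1 ((K : Int) + 1) 1).foldl (fun counts i =>
        (PySem.List.pyRange i (n + 1) i).foldl
          (fun c j => c.set (j - 1).toNat (PySem.List.pyGetD c (j - 1) 0 + 1)) counts)
        (List.replicate n.toNat (0 : Int)) = prev at ihlen ihget ⊢
    obtain ⟨h1, h2⟩ := inner_pass ((K : Int) + 1) n (by omega) prev (by rw [ihlen]; omega)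
    constructor
    · rw [h1, ihlen]
    · intro k hk
      rw [h2 k (by rw [ihlen]; exact hk), ihget k hk, pvCnt_succ]
      have : ((K : Int) + 1) ∣ ((k : Int) + 1) ↔ ((K : Nat) + 1) ∣ (k + 1) := by
        constructor
        · intro h; exact_mod_cast h
        · intro h; exact_mod_cast h
      by_cases hd : ((K : Nat) + 1) ∣ (k + 1)
      · simp [this, hd]
      · simp [this, hd]

-- one iteration of A's loop carried out on the normal form
lemma stepA_toggle (n : Int) (M : Nat) (_hn : 0 ≤ n) :
    (fun doors (i : Int) =>
      if i = 1 then List.replicate n.toNat true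
      else if i = 2 then
        (PySem.List.pyRange 0 n 1).map (fun j =>
          if PySem.Int.mod (j + 1) 2 = 0 then !(PySem.List.pyGetD doors j false)
          else PySem.List.pyGetD doors j false)
      else
        (PySem.List.pyRange 0 n 1).map (fun j =>
          if PySem.Int.mod (j + 1) i = 0 then !(PySem.List.pyGetD doors j false)
          else PySem.List.pyGetD doors j false))
      (pvDoors n.toNat M) ((M : Int) + 1) = pvDoors n.toNat (M + 1) := by
  have hmain : ∀ i : Int, i = (M : Int) + 1 → 1 ≤ M →
      (PySem.List.pyRange 0 n 1).map (fun j =>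
        if PySem.Int.mod (j + 1) i = 0 then !(PySem.List.pyGetD (pvDoors n.toNat M) j false)
        else PySem.List.pyGetD (pvDoors n.toNat M) j false) = pvDoors n.toNat (M + 1) := by
    intro i hi hM
    rw [PySem.List.pyRange_zero, List.map_map, pvDoors]
    refine List.map_congr_left ?_
    intro j hj
    have hjn : j < n.toNat := List.mem_range.mp hj
    have hget : PySem.List.pyGetD (pvDoors n.toNat M) (j : Int) false
        = decide (pvCnt (j + 1) M % 2 = 1) := by
      rw [PySem.List.pyGetD_of_nonneg _ _ (by omega)]
      simp only [Int.toNat_natCast, pvDoors]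
      exact PySem.List.getD_map_range _ _ _ _ hjn
    rw [pvDoors] at hget
    have hmod : (PySem.Int.mod ((j : Int) + 1) i = 0) ↔ ((M + 1) ∣ (j + 1)) := by
      rw [PySem.Int.mod_eq_zero_iff_dvd, hi]
      constructor
      · intro h; exact_mod_cast h
      · intro h; exact_mod_cast h
    simp only [Function.comp_apply]
    rw [hget]
    by_cases hd : (M + 1) ∣ (j + 1)
    · rw [if_pos (hmod.mpr hd)]
      rcases Nat.mod_two_eq_zero_or_one (pvCnt (j + 1) M) with h | h <;>
        simp [pvCnt_succ, hd, h, Nat.add_mod]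
    · rw [if_neg (fun h => hd (hmod.mp h))]
      simp [pvCnt_succ, hd]
  rcases Nat.eq_zero_or_pos M with hM | hM
  · subst hM
    have hone : pvDoors n.toNat (0 + 1) = List.replicate n.toNat true := by
      rw [pvDoors]
      have hall : ∀ j ∈ List.range n.toNat, decide (pvCnt (j + 1) (0 + 1) % 2 = 1) = true := by
        intro j hj
        have hc : pvCnt (j + 1) (0 + 1) = 1 := by
          rw [pvCnt_succ, pvCnt_zero]
          simp
        simp [hc]
      rw [List.map_congr_left hall]
      simp
    rw [hone]
    norm_num
  · have h1 : ((M : Int) + 1) ≠ 1 := by omega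
    have hstep := hmain ((M : Int) + 1) rfl hM
    by_cases h2 : ((M : Int) + 1) = 2
    · simp only [h2]
      rw [if_neg (by norm_num : ¬ (2 : Int) = 1), ← h2]
      exact hstep
    · simp only [h1, h2, if_false]
      exact hstep

-- A's whole loop on the normal form
lemma A_fold (n : Int) (M : Nat) (hn : 0 ≤ n) :
    (PySem.List.pyRange 1 ((M : Int) + 1) 1).foldl (fun doors (i : Int) =>
      if i = 1 then List.replicate n.toNat true
      else if i = 2 then
        (PySem.List.pyRange 0 n 1).map (fun j =>
          if PySem.Int.mod (j + 1) 2 = 0 then !(PySem.List.pyGetD doors j false)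
          else PySem.List.pyGetD doors j false)
      else
        (PySem.List.pyRange 0 n 1).map (fun j =>
          if PySem.Int.mod (j + 1) i = 0 then !(PySem.List.pyGetD doors j false)
          else PySem.List.pyGetD doors j false))
      (List.replicate n.toNat false) = pvDoors n.toNat M := by
  induction M with
  | zero =>
    rw [show PySem.List.pyRange 1 (((0 : Nat) : Int) + 1) 1 = []
      from PySem.List.pyRange_one_eq_nil (by norm_num)]
    simp [pvDoors, pvCnt_zero, List.foldl_nil]
  | succ M ih =>
    rw [show ((M + 1 : Nat) : Int) + 1 = ((M : Int) + 1) + 1 by push_cast; ring,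
        PySem.List.pyRange_one_succ_right (by omega), List.foldl_append, List.foldl_cons,
        List.foldl_nil, ih]
    exact stepA_toggle n M hn

lemma toggle_doors_eq_pvDoors (num_doors num_iterations : Int) :
    toggle_doors num_doors num_iterations = pvDoors num_doors.toNat num_iterations.toNat := by
  rcases le_or_gt num_doors 0 with hn | hn
  · -- no doors: every intermediate list is empty
    have hn0 : num_doors.toNat = 0 := by omega
    have hr : PySem.List.pyRange 0 num_doors 1 = [] := PySem.List.pyRange_one_eq_nil hn
    rw [toggle_doors]
    simp only [hn0, List.replicate_zero, pvDoors, List.range_zero, hr]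
    induction (PySem.List.pyRange 1 (num_iterations + 1) 1) with
    | nil => rfl
    | cons e L ihL =>
      simp only [List.foldl_cons, List.map_nil]
      have hbody : (if e = 1 then ([] : List Bool) else if e = 2 then [] else []) = [] := by
        split_ifs <;> rfl
      rw [hbody]
      exact ihL
  · have hrange : PySem.List.pyRange 1 (num_iterations + 1) 1
        = PySem.List.pyRange 1 ((num_iterations.toNat : Int) + 1) 1 := by
      rcases le_or_gt num_iterations 0 with hm | hm
      · rw [PySem.List.pyRange_one_eq_nil (by omega), PySem.List.pyRange_one_eq_nil (by omega)]
      · congr 1; omega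
    rw [toggle_doors]
    simp only [hrange]
    exact A_fold num_doors num_iterations.toNat (by omega)

lemma toggle_doors_alt_eq_pvDoors (num_doors num_iterations : Int) :
    toggle_doors_alt num_doors num_iterations = pvDoors num_doors.toNat num_iterations.toNat := by
  rw [toggle_doors_alt]
  set n : Int := if num_doors > 0 then num_doors else 0 with hn
  have hn0 : 0 ≤ n := by rw [hn]; split_ifs <;> omega
  have hnn : n.toNat = num_doors.toNat := by rw [hn]; split_ifs <;> omega
  set m : Int := min num_iterations n with hm
  have hrange : PySem.List.pyRange 1 (m + 1) 1 = PySem.List.pyRange 1 ((m.toNat : Int) + 1) 1 := by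
    rcases le_or_gt m 0 with h | h
    · rw [PySem.List.pyRange_one_eq_nil (by omega), PySem.List.pyRange_one_eq_nil (by omega)]
    · congr 1; omega
  simp only [hrange]
  obtain ⟨hlen, hget⟩ := B_fold n m.toNat hn0
  set counts := (PySem.List.pyRange 1 ((m.toNat : Int) + 1) 1).foldl (fun counts i =>
    (PySem.List.pyRange i (n + 1) i).foldl
      (fun c j => c.set (j - 1).toNat (PySem.List.pyGetD c (j - 1) 0 + 1)) counts)
    (List.replicate n.toNat (0 : Int)) with hcounts
  have hclist : counts = (List.range n.toNat).map (fun k => (pvCnt (k + 1) m.toNat : Int)) := by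
    apply List.ext_getElem (by simp [hlen])
    intro k h1 h2
    have hk : k < n.toNat := by rw [← hlen]; exact h1
    have := hget k hk
    rw [List.getD_eq_getElem?_getD, List.getElem?_eq_getElem h1] at this
    simp only [Option.getD_some] at this
    simp [this]
  rw [hclist, List.map_map, pvDoors, ← hnn]
  refine List.map_congr_left ?_
  intro j hj
  have hjn : j < n.toNat := List.mem_range.mp hj
  have hcnt : pvCnt (j + 1) m.toNat = pvCnt (j + 1) num_iterations.toNat := by
    rcases le_or_gt num_iterations n with h | h
    · have : m = num_iterations := by rw [hm]; omega
      rw [this]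
    · have hmn : m = n := by rw [hm]; omega
      have h1 : pvCnt (j + 1) num_iterations.toNat = pvCnt (j + 1) (j + 1) :=
        pvCnt_stable _ _ _ (by omega) (by omega) (by omega)
      have h2 : pvCnt (j + 1) m.toNat = pvCnt (j + 1) (j + 1) :=
        pvCnt_stable _ _ _ (by omega) (by omega) (by omega)
      rw [h1, h2]
  have hmod : PySem.Int.mod ((pvCnt (j + 1) m.toNat : Int)) 2
      = ((pvCnt (j + 1) m.toNat % 2 : Nat) : Int) := by
    rw [PySem.Int.mod_eq_emod_of_pos (by norm_num)]
    push_cast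
    rfl
  show (PySem.Int.mod ((pvCnt (j + 1) m.toNat : Int)) 2 == 1)
      = decide (pvCnt (j + 1) num_iterations.toNat % 2 = 1)
  rw [hmod, hcnt]
  by_cases hp : pvCnt (j + 1) num_iterations.toNat % 2 = 1
  · simp [hp]
  · simp only [hp, decide_false]
    rw [beq_eq_false_iff_ne]
    intro h
    exact hp (by exact_mod_cast h)

-- ===== VERDICT (by name: the statement is the Claim_ definition above) =====
theorem toggle_doors_spec : Claim_equal_toggle_doors := by
  intro num_doors num_iterations _
  unfold Spec_toggle_doors
  rw [toggle_doors_eq_pvDoors, toggle_doors_alt_eq_pvDoors]
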